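-- pv_equiv track=rewrite | github.com/dikos1337/competitive-programming | checkio/Scientific Expedition/Caps Lock.py | caps_lock
-- ===== SOURCE A (Python) =====
-- def caps_lock(text: str) -> str:
--     caps: bool = False
--     answer: str = []
--
--     for c in text:
--         if c == "a":
--             caps = not caps
--         else:
--             if caps:
--                 answer.append(c.upper())
--             else:
--                 answer.append(c)
--
--     return "".join(answer)
-- ===== SOURCE B (Python) =====
-- def caps_lock(text: str) -> str:
--     parts = text.split("a")
--     return "".join(p.upper() if i % 2 else p for i, p in enumerate(parts))
-- ===== Notes on version B (the rewrite author's own statement) =====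
-- stated objective: simpler
-- what changed: Replaces the explicit caps-flag state machine over characters with split('a') followed by uppercasing the odd-indexed segments and joining; segment parity replaces the mutable toggle.
import Mathlib
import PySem

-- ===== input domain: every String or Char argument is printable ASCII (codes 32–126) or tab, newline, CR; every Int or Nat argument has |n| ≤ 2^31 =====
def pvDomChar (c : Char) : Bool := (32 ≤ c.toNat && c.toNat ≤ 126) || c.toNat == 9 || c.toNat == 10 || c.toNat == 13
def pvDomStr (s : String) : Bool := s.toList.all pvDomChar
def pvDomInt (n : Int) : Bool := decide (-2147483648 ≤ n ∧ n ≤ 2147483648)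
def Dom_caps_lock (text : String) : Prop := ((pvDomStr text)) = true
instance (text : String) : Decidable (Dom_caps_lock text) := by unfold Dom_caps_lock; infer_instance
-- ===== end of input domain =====

-- B replaces A's character-by-character caps-flag state machine by split('a') + uppercasing the
-- odd-indexed segments (simpler decomposition, same O(n) cost).

-- ===== PORT A =====
-- literal port of A: fold over the characters carrying (caps, answer)
def caps_lock (text : String) : String :=
  String.mk (text.toList.foldl
    (fun (st : Bool × List Char) c =>
      if c = 'a' then (!st.1, st.2)
      else if st.1 then (st.1, st.2 ++ [PySem.Chars.upperChar c])
      else (st.1, st.2 ++ [c]))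
    (false, [])).2

-- ===== PORT B =====
-- literal port of B: split on 'a', uppercase odd-indexed parts, join
def caps_lock_alt (text : String) : String :=
  String.mk (((PySem.List.enumerate (text.toList.splitOn 'a')).map
    (fun p => if p.1 % 2 ≠ 0 then PySem.Chars.upper p.2 else p.2)).flatten)

-- ===== PRECONDITION & SPEC =====
def Spec_caps_lock (text : String) (out : String) : Prop := out = caps_lock_alt text
instance (text : String) (out : String) : Decidable (Spec_caps_lock text out) := by unfold Spec_caps_lock; infer_instance

-- ===== CLAIM (what is proved, stated in full; the proofs are below) =====
def Claim_equal_caps_lock : Prop := ∀ (text : String), Dom_caps_lock text → Spec_caps_lock text (caps_lock text)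

-- ===== LEMMAS AND PROOFS =====

-- the common specification: process cs with the caps flag b
def capsGo (cs : List Char) (b : Bool) : List Char :=
  match cs with
  | [] => []
  | c :: cs => if c = 'a' then capsGo cs (!b)
               else (if b then PySem.Chars.upperChar c else c) :: capsGo cs b

-- A's fold equals capsGo
lemma capsA_eq (cs : List Char) (b : Bool) (acc : List Char) :
    (cs.foldl
      (fun (st : Bool × List Char) c =>
        if c = 'a' then (!st.1, st.2)
        else if st.1 then (st.1, st.2 ++ [PySem.Chars.upperChar c])
        else (st.1, st.2 ++ [c]))
      (b, acc)).2 = acc ++ capsGo cs b := by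
  induction cs generalizing b acc with
  | nil => simp [capsGo]
  | cons c cs ih =>
    by_cases hc : c = 'a'
    · simp [hc, capsGo, List.foldl_cons, ih]
    · cases b <;> simp [hc, capsGo, List.foldl_cons, ih]

-- B's alternating segments, abstracted from the enumerate indices
def capsF (parts : List (List Char)) (b : Bool) : List Char :=
  match parts with
  | [] => []
  | p :: ps => (if b then PySem.Chars.upper p else p) ++ capsF ps (!b)

lemma enumerate_flatten_eq_capsF (parts : List (List Char)) (s : Int) (hs : 0 ≤ s) :
    ((PySem.List.enumerate parts s).map
      (fun p => if p.1 % 2 ≠ 0 then PySem.Chars.upper p.2 else p.2)).flatten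
      = capsF parts (s % 2 ≠ 0) := by
  induction parts generalizing s with
  | nil => simp [capsF]
  | cons p ps ih =>
    have h1 : (0:Int) ≤ s + 1 := by omega
    have hpar : decide ((s + 1) % 2 ≠ 0) = !decide (s % 2 ≠ 0) := by
      by_cases h : s % 2 = 0
      · have h2 : (s + 1) % 2 ≠ 0 := by omega
        simp [h, h2]
      · have h2 : (s + 1) % 2 = 0 := by omega
        simp [h, h2]
    rw [PySem.List.enumerate_cons, List.map_cons, List.flatten_cons, ih (s+1) h1]
    simp only [capsF, hpar]
    by_cases h : s % 2 ≠ 0 <;> simp [h]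
lemma upper_cons (c : Char) (p : List Char) :
    PySem.Chars.upper (c :: p) = PySem.Chars.upperChar c :: PySem.Chars.upper p := by
  simp [PySem.Chars.upper]

lemma capsF_splitOn (cs : List Char) (b : Bool) :
    capsF (cs.splitOn 'a') b = capsGo cs b := by
  induction cs generalizing b with
  | nil => simp [List.splitOn, capsF, capsGo, PySem.Chars.upper]
  | cons c cs ih =>
    by_cases hc : c = 'a'
    · have : (c :: cs).splitOn 'a' = [] :: cs.splitOn 'a' := by
        simp [List.splitOn, List.splitOnP_cons, hc]
      rw [this, capsF]
      simp [capsGo, hc, ih, PySem.Chars.upper]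
    · have hsplit : (c :: cs).splitOn 'a' = (cs.splitOn 'a').modifyHead (c :: ·) := by
        simp [List.splitOn, List.splitOnP_cons, hc]
      obtain ⟨p, ps, hps⟩ : ∃ p ps, cs.splitOn 'a' = p :: ps := by
        rcases h : cs.splitOn 'a' with _ | ⟨p, ps⟩
        · exact absurd h (by simp [List.splitOn, List.splitOnP_ne_nil])
        · exact ⟨p, ps, rfl⟩
      rw [hsplit, hps, List.modifyHead, capsF]
      have := ih b
      rw [hps, capsF] at this
      cases b <;> simp_all [capsGo, upper_cons]

-- ===== VERDICT (by name: the statement is the Claim_ definition above) =====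
theorem caps_lock_spec : Claim_equal_caps_lock := by
  intro text _
  unfold Spec_caps_lock caps_lock caps_lock_alt
  rw [capsA_eq, enumerate_flatten_eq_capsF _ 0 (le_refl 0), capsF_splitOn]
  simp
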